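-- pv_equiv track=rewrite | github.com/marzikill/NSI | Bloc1-programmation/projet-traitement_image/Programme et images/traitement_image2019-V2.py | zoom
-- ===== SOURCE A (Python) =====
-- def zoom(l,h,photo):
--
--     #creation matrice vide (2xZ fois plus grande)
--     ligne=[0]*l*2
--     p2=[ligne[:] for i in range (0,h*2)]
--
--     #version 1
--     for j in range (0,h):
--         for k in range (0,l):
--             p2[j*2][k*2]=photo[j][k]
--             p2[j*2+1][k*2]=photo[j][k]
--             p2[j*2][k*2+1]=photo[j][k]
--             p2[j*2+1][k*2+1]=photo[j][k]
--
--     #version 2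
--     for j in range (1,h-1):
--         for k in range (1,l-1):
--             p2[j*2][k*2]=int((photo[j][k]+photo[j-1][k]+photo[j][k-1]+photo[j-1][k-1])/4)    #haut gauche
--             p2[j*2+1][k*2]=int((photo[j][k]+photo[j+1][k]+photo[j][k-1]+photo[j+1][k-1])/4)  #haut droite
--             p2[j*2][k*2+1]=int((photo[j][k]+photo[j-1][k]+photo[j][k+1]+photo[j-1][k+1])/4)  #bas gauche
--             p2[j*2+1][k*2+1]=int((photo[j][k]+photo[j+1][k]+photo[j][k+1]+photo[j+1][k+1])/4)  #bas droite
--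
--     return p2,l*2,h*2
-- ===== SOURCE B (Python) =====
-- def zoom(l, h, photo):
--     # One pass over the source pixels: each (j,k) directly yields the four
--     # output cells (averaged in the interior, copied on the border).
--     p2 = []
--     for j in range(h):
--         top = []
--         bot = []
--         for k in range(l):
--             if 1 <= j <= h - 2 and 1 <= k <= l - 2:
--                 top.append(int((photo[j][k]+photo[j-1][k]+photo[j][k-1]+photo[j-1][k-1])/4))
--                 top.append(int((photo[j][k]+photo[j-1][k]+photo[j][k+1]+photo[j-1][k+1])/4))
--                 bot.append(int((photo[j][k]+photo[j+1][k]+photo[j][k-1]+photo[j+1][k-1])/4))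
--                 bot.append(int((photo[j][k]+photo[j+1][k]+photo[j][k+1]+photo[j+1][k+1])/4))
--             else:
--                 v = photo[j][k]
--                 top += [v, v]
--                 bot += [v, v]
--         p2.append(top)
--         p2.append(bot)
--     return p2, l * 2, h * 2
-- ===== Notes on version B (the rewrite author's own statement) =====
-- stated objective: simpler
-- what changed: Instead of allocating a zero matrix, stretching every pixel into a 2x2 block and then overwriting the interior blocks in a second double pass of index assignments, B builds the output rows directly in one pass: each source pixel emits its four output cells at once (averaged in the interior, copied on the border), so the fill-then-overwrite redundancy and all index arithmetic into a pre-allocated matrix disappear.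
import Mathlib
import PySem

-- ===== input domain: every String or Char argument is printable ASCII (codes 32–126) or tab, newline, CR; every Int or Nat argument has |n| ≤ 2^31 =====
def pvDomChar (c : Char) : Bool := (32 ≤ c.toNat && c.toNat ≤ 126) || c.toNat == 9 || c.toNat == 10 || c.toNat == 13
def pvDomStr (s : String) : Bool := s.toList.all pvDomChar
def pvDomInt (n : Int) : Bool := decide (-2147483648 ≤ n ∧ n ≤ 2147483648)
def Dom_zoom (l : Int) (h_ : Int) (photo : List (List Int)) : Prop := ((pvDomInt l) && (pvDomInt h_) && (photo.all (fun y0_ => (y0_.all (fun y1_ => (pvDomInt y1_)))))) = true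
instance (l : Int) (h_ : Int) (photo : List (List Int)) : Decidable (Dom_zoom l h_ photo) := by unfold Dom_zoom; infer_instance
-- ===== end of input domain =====

-- B builds the zoomed rows directly in one pass (average in the interior, copy on the border)
-- instead of A's fill-everything-then-overwrite-the-interior two passes; objective: simpler.


-- ===== PORT A =====
-- photo[j][k]: always in range under Pre_zoom (Python raises exactly on the excluded inputs,
-- so the defaults []/0 are never reached on inputs satisfying Pre_zoom).
def pvRead (photo : List (List Int)) (j k : Int) : Int :=
  PySem.List.pyGetD (PySem.List.pyGetD photo j []) k 0

-- p2[r][c] = v : the indices r, c are always ≥ 0 here (they come from ranges starting at 0 or 1),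
-- and in range for the allocated p2, where List.set is exactly Python's item assignment.
def pvWrite (m : List (List Int)) (r c : Int) (v : Int) : List (List Int) :=
  m.set r.toNat ((m.getD r.toNat []).set c.toNat v)

def zoom (l : Int) (h_ : Int) (photo : List (List Int)) : List (List Int) × Int × Int :=
  -- ligne = [0]*l*2 ; p2 = [ligne[:] for i in range(0, h*2)]
  let ligne : List Int := List.replicate l.toNat 0 ++ List.replicate l.toNat 0
  let p0 : List (List Int) := (PySem.List.pyRange 0 (h_ * 2) 1).map (fun _ => ligne)
  -- version 1
  let p1 := (PySem.List.pyRange 0 h_ 1).foldl (fun m j =>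
    (PySem.List.pyRange 0 l 1).foldl (fun m k =>
      let m := pvWrite m (j * 2) (k * 2) (pvRead photo j k)
      let m := pvWrite m (j * 2 + 1) (k * 2) (pvRead photo j k)
      let m := pvWrite m (j * 2) (k * 2 + 1) (pvRead photo j k)
      pvWrite m (j * 2 + 1) (k * 2 + 1) (pvRead photo j k)) m) p0
  -- version 2; int(x/4) is PySem.Int.truncdiv x 4 (exact: |x| < 2^53 on Dom_zoom)
  let p2 := (PySem.List.pyRange 1 (h_ - 1) 1).foldl (fun m j =>
    (PySem.List.pyRange 1 (l - 1) 1).foldl (fun m k =>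
      let m := pvWrite m (j * 2) (k * 2)
        (PySem.Int.truncdiv (pvRead photo j k + pvRead photo (j-1) k + pvRead photo j (k-1) + pvRead photo (j-1) (k-1)) 4)
      let m := pvWrite m (j * 2 + 1) (k * 2)
        (PySem.Int.truncdiv (pvRead photo j k + pvRead photo (j+1) k + pvRead photo j (k-1) + pvRead photo (j+1) (k-1)) 4)
      let m := pvWrite m (j * 2) (k * 2 + 1)
        (PySem.Int.truncdiv (pvRead photo j k + pvRead photo (j-1) k + pvRead photo j (k+1) + pvRead photo (j-1) (k+1)) 4)
      pvWrite m (j * 2 + 1) (k * 2 + 1)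
        (PySem.Int.truncdiv (pvRead photo j k + pvRead photo (j+1) k + pvRead photo j (k+1) + pvRead photo (j+1) (k+1)) 4)) m) p1
  (p2, l * 2, h_ * 2)

-- ===== PORT B =====
def zoom_alt (l : Int) (h_ : Int) (photo : List (List Int)) : List (List Int) × Int × Int :=
  let p2 := (PySem.List.pyRange 0 h_ 1).foldl (fun p2 j =>
    let tb := (PySem.List.pyRange 0 l 1).foldl (fun (tb : List Int × List Int) k =>
      if 1 ≤ j ∧ j ≤ h_ - 2 ∧ 1 ≤ k ∧ k ≤ l - 2 then
        (tb.1 ++ [PySem.Int.truncdiv (pvRead photo j k + pvRead photo (j-1) k + pvRead photo j (k-1) + pvRead photo (j-1) (k-1)) 4,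
                  PySem.Int.truncdiv (pvRead photo j k + pvRead photo (j-1) k + pvRead photo j (k+1) + pvRead photo (j-1) (k+1)) 4],
         tb.2 ++ [PySem.Int.truncdiv (pvRead photo j k + pvRead photo (j+1) k + pvRead photo j (k-1) + pvRead photo (j+1) (k-1)) 4,
                  PySem.Int.truncdiv (pvRead photo j k + pvRead photo (j+1) k + pvRead photo j (k+1) + pvRead photo (j+1) (k+1)) 4])
      else
        let v := pvRead photo j k
        (tb.1 ++ [v, v], tb.2 ++ [v, v])) (([], []) : List Int × List Int)
    p2 ++ [tb.1] ++ [tb.2]) []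
  (p2, l * 2, h_ * 2)

-- ===== PRECONDITION & SPEC =====
-- Pre_zoom: exactly the inputs where Python A returns (it raises IndexError iff, with h > 0 and
-- l > 0, photo has fewer than h rows or one of the first h rows has fewer than l entries).
def Pre_zoom (l : Int) (h_ : Int) (photo : List (List Int)) : Prop :=
  0 < h_ → 0 < l → (h_.toNat ≤ photo.length ∧ ∀ row ∈ photo.take h_.toNat, l.toNat ≤ row.length)
instance (l : Int) (h_ : Int) (photo : List (List Int)) : Decidable (Pre_zoom l h_ photo) := by
  unfold Pre_zoom; infer_instance

def pvWitness_zoom : Int × Int × List (List Int) := (2, 2, [[1, 2], [3, 4]])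

def Spec_zoom (l : Int) (h_ : Int) (photo : List (List Int)) (out : List (List Int) × Int × Int) : Prop := out = zoom_alt l h_ photo
instance (l : Int) (h_ : Int) (photo : List (List Int)) (out : List (List Int) × Int × Int) : Decidable (Spec_zoom l h_ photo out) := by unfold Spec_zoom; infer_instance

-- ===== CLAIM (what is proved, stated in full; the proofs are below) =====
def Claim_equal_zoom : Prop := ∀ (l : Int) (h_ : Int) (photo : List (List Int)), Dom_zoom l h_ photo → Pre_zoom l h_ photo → Spec_zoom l h_ photo (zoom l h_ photo)

-- ===== LEMMAS AND PROOFS =====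

-- the value written into the four output cells of source pixel (a, b) by the interior pass
def pvV2 (photo : List (List Int)) (a b : Nat) (dr dc : Nat) : Int :=
  let j : Int := a; let k : Int := b
  let j' := if dr = 0 then j - 1 else j + 1
  let k' := if dc = 0 then k - 1 else k + 1
  PySem.Int.truncdiv (pvRead photo j k + pvRead photo j' k + pvRead photo j k' + pvRead photo j' k') 4

-- the value of the output cell in quarter (dr, dc) of the block of source pixel (j, k)
def pvEI (l : Int) (h_ : Int) (photo : List (List Int)) (j k : Int) (dr dc : Nat) : Int :=
  if 1 ≤ j ∧ j ≤ h_ - 2 ∧ 1 ≤ k ∧ k ≤ l - 2 then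
    let j' := if dr = 0 then j - 1 else j + 1
    let k' := if dc = 0 then k - 1 else k + 1
    PySem.Int.truncdiv (pvRead photo j k + pvRead photo j' k + pvRead photo j k' + pvRead photo j' k') 4
  else pvRead photo j k

-- the value of output cell (r, c)
def pvCell (l : Int) (h_ : Int) (photo : List (List Int)) (r c : Nat) : Int :=
  pvEI l h_ photo ((r / 2 : Nat) : Int) ((c / 2 : Nat) : Int) (r % 2) (c % 2)

def pvMat (l : Int) (h_ : Int) (photo : List (List Int)) : List (List Int) :=
  (List.range (2 * h_.toNat)).map (fun r => (List.range (2 * l.toNat)).map (pvCell l h_ photo r))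

def pvWr4 (V : Nat → Nat → Nat → Nat → Int) (m : List (List Int)) (a b : Nat) : List (List Int) :=
  let j : Int := (a : Int)
  let k : Int := (b : Int)
  let m := pvWrite m (j * 2) (k * 2) (V a b 0 0)
  let m := pvWrite m (j * 2 + 1) (k * 2) (V a b 1 0)
  let m := pvWrite m (j * 2) (k * 2 + 1) (V a b 0 1)
  pvWrite m (j * 2 + 1) (k * 2 + 1) (V a b 1 1)

def pvShp (m : List (List Int)) (R C : Nat) : Prop := m.length = R ∧ ∀ row ∈ m, row.length = C

def pvOcell (m : List (List Int)) (r c : Nat) : Option Int := m[r]?.bind (fun row => row[c]?)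

lemma pvShp_write (m : List (List Int)) (R C : Nat) (hS : pvShp m R C) (r c : Int) (v : Int) :
    pvShp (pvWrite m r c v) R C := by
  obtain ⟨h1, h2⟩ := hS
  refine ⟨by simp [pvWrite, h1], ?_⟩
  intro row hrow
  by_cases hin : r.toNat < m.length
  · rcases List.mem_or_eq_of_mem_set hrow with h | h
    · exact h2 _ h
    · subst h
      rw [List.length_set, List.getD_eq_getElem m [] hin]
      exact h2 _ (List.getElem_mem hin)
  · rw [pvWrite, List.set_eq_of_length_le (by omega)] at hrow
    exact h2 _ hrow

lemma pvOcell_write (m : List (List Int)) (R C : Nat) (hS : pvShp m R C) (a b : Nat)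
    (ha : a < R) (hb : b < C) (v : Int) (r c : Nat) :
    pvOcell (pvWrite m (a : Nat) (b : Nat) v) r c = if a = r ∧ b = c then some v else pvOcell m r c := by
  obtain ⟨h1, h2⟩ := hS
  have ham : a < m.length := by omega
  have hrowlen : (m.getD a []).length = C := by
    rw [List.getD_eq_getElem m [] ham]; exact h2 _ (List.getElem_mem ham)
  unfold pvWrite pvOcell
  simp only [Int.toNat_natCast]
  by_cases hr : a = r
  · subst hr
    have hmr : m[a]? = some (m.getD a []) := by
      rw [List.getD_eq_getElem m [] ham, List.getElem?_eq_getElem ham]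
    rw [List.getElem?_set_self ham, hmr]
    simp only [Option.bind_some, List.getElem?_set]
    split_ifs with h1' h2' <;> simp_all
  · rw [List.getElem?_set_ne hr]
    simp [hr]

lemma pvShp_wr4 (V : Nat → Nat → Nat → Nat → Int) (m : List (List Int)) (R C : Nat)
    (hS : pvShp m R C) (a b : Nat) : pvShp (pvWr4 V m a b) R C := by
  exact pvShp_write _ _ _ (pvShp_write _ _ _ (pvShp_write _ _ _ (pvShp_write _ _ _ hS _ _ _) _ _ _) _ _ _) _ _ _

lemma pvOcell_foldl_wr4 (V : Nat → Nat → Nat → Nat → Int) (qs : List (Nat × Nat))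
    (m : List (List Int)) (R C : Nat) (hS : pvShp m R C)
    (hq : ∀ q ∈ qs, 2 * q.1 + 1 < R ∧ 2 * q.2 + 1 < C) (r c : Nat) :
    pvOcell (qs.foldl (fun m q => pvWr4 V m q.1 q.2) m) r c
      = if (r / 2, c / 2) ∈ qs then some (V (r / 2) (c / 2) (r % 2) (c % 2)) else pvOcell m r c := by
  induction qs generalizing m with
  | nil => simp
  | cons q t ih =>
    obtain ⟨a, b⟩ := q
    obtain ⟨hqa, hqb⟩ := hq (a, b) List.mem_cons_self
    simp only at hqa hqb
    rw [List.foldl_cons, ih _ (pvShp_wr4 V m R C hS a b) (fun q hmem => hq q (List.mem_cons_of_mem _ hmem))]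
    by_cases hmem : (r / 2, c / 2) ∈ t
    · simp [hmem]
    · have hc1 := pvOcell_write m R C hS (a*2) (b*2) (by omega) (by omega) (V a b 0 0) r c
      have hS1 := pvShp_write m R C hS (a*2 : Nat) (b*2 : Nat) (V a b 0 0)
      have hc2 := pvOcell_write _ R C hS1 (a*2+1) (b*2) (by omega) (by omega) (V a b 1 0) r c
      have hS2 := pvShp_write _ R C hS1 (a*2+1 : Nat) (b*2 : Nat) (V a b 1 0)
      have hc3 := pvOcell_write _ R C hS2 (a*2) (b*2+1) (by omega) (by omega) (V a b 0 1) r c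
      have hS3 := pvShp_write _ R C hS2 (a*2 : Nat) (b*2+1 : Nat) (V a b 0 1)
      have hc4 := pvOcell_write _ R C hS3 (a*2+1) (b*2+1) (by omega) (by omega) (V a b 1 1) r c
      push_cast at hc1 hc2 hc3 hc4
      simp only [pvWr4, hmem, if_false, List.mem_cons, Prod.mk.injEq, or_false]
      rw [hc4, hc3, hc2, hc1]
      split_ifs <;>
        first
          | rfl
          | (exfalso; omega)
          | (rw [show r / 2 = a from by omega, show c / 2 = b from by omega,
                 show r % 2 = 1 from by omega, show c % 2 = 1 from by omega])
          | (rw [show r / 2 = a from by omega, show c / 2 = b from by omega,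
                 show r % 2 = 0 from by omega, show c % 2 = 1 from by omega])
          | (rw [show r / 2 = a from by omega, show c / 2 = b from by omega,
                 show r % 2 = 1 from by omega, show c % 2 = 0 from by omega])
          | (rw [show r / 2 = a from by omega, show c / 2 = b from by omega,
                 show r % 2 = 0 from by omega, show c % 2 = 0 from by omega])

lemma pvShp_foldl_wr4 (V : Nat → Nat → Nat → Nat → Int) (qs : List (Nat × Nat))
    (m : List (List Int)) (R C : Nat) (hS : pvShp m R C) :
    pvShp (qs.foldl (fun m q => pvWr4 V m q.1 q.2) m) R C := by
  induction qs generalizing m with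
  | nil => exact hS
  | cons q t ih => exact ih _ (pvShp_wr4 V m R C hS q.1 q.2)

lemma pv_foldl_foldl_pairs {M : Type} (f : M → Nat → Nat → M) (ns ms : List Nat) (m : M) :
    ns.foldl (fun m j => ms.foldl (fun m k => f m j k) m) m
      = (ns.flatMap fun j => ms.map (fun k => (j, k))).foldl (fun m p => f m p.1 p.2) m := by
  induction ns generalizing m with
  | nil => rfl
  | cons j t ih => simp only [List.flatMap_cons, List.foldl_append, List.foldl_map, List.foldl_cons, ih]

lemma pv_mem_pairs (H L oj ok x y : Nat) :
    ((x, y) ∈ (List.range H).flatMap fun a => (List.range L).map fun b => ((a + oj, b + ok) : Nat × Nat))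
      ↔ (oj ≤ x ∧ x < H + oj ∧ ok ≤ y ∧ y < L + ok) := by
  simp only [List.mem_flatMap, List.mem_map, List.mem_range, Prod.mk.injEq]
  constructor
  · rintro ⟨a, ha, b, hb, he1, he2⟩; omega
  · rintro ⟨hx1, hx2, hy1, hy2⟩
    exact ⟨x - oj, by omega, ⟨y - ok, by omega, by omega, by omega⟩⟩

lemma pv_getElem?_flatMap_two {α β : Type} (f g : α → β) (js : List α) (r : Nat) :
    (js.flatMap fun j => [f j, g j])[r]? = js[r / 2]?.map (fun j => if r % 2 = 0 then f j else g j) := by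
  induction js generalizing r with
  | nil => simp
  | cons j t ih =>
    match r with
    | 0 => simp
    | 1 => simp
    | (n+2) =>
      have h2 : (n + 2) / 2 = n / 2 + 1 := by omega
      have h3 : (n + 2) % 2 = n % 2 := by omega
      simp only [List.flatMap_cons, List.cons_append,
        List.getElem?_cons_succ, h2, h3]
      exact ih n

lemma pv_eq_mat_of (m : List (List Int)) (R C : Nat) (F : Nat → Nat → Int) (hS : pvShp m R C)
    (hc : ∀ r c, r < R → c < C → pvOcell m r c = some (F r c)) :
    m = (List.range R).map (fun r => (List.range C).map (F r)) := by
  obtain ⟨h1, h2⟩ := hS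
  apply List.ext_getElem?
  intro r
  by_cases hr : r < R
  · rw [List.getElem?_map, List.getElem?_range hr, List.getElem?_eq_getElem (by omega)]
    simp only [Option.map_some]
    congr 1
    apply List.ext_getElem?
    intro c
    by_cases hcb : c < C
    · rw [List.getElem?_map, List.getElem?_range hcb]
      have := hc r c hr hcb
      unfold pvOcell at this
      rw [List.getElem?_eq_getElem (by omega)] at this
      simpa using this
    · have hrm : r < m.length := by omega
      rw [List.getElem?_map,
        show (List.range C)[c]? = none from List.getElem?_eq_none (by rw [List.length_range]; omega)]
      simp only [Option.map_none]
      exact List.getElem?_eq_none (by rw [h2 _ (List.getElem_mem hrm)]; omega)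
  · rw [List.getElem?_eq_none (by omega), List.getElem?_eq_none (by simp; omega)]

lemma pv_pyRange_zero (b : Int) :
    PySem.List.pyRange 0 b 1 = (List.range b.toNat).map (fun k : Nat => (k : Int)) := by
  rw [PySem.List.pyRange_one]; simp

lemma pv_pyRange_one' (b : Int) :
    PySem.List.pyRange 1 b 1 = (List.range (b - 1).toNat).map (fun k : Nat => ((k + 1 : Nat) : Int)) := by
  rw [PySem.List.pyRange_one]
  apply List.map_congr_left
  intro a _; push_cast; ring

lemma zoomA_mat (l h_ : Int) (photo : List (List Int)) :
    (zoom l h_ photo).1 = pvMat l h_ photo := by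
  have hA : (zoom l h_ photo).1
      = (((List.range (h_ - 2).toNat).flatMap fun a => (List.range (l - 2).toNat).map fun b => ((a + 1, b + 1) : Nat × Nat)).foldl
          (fun m q => pvWr4 (pvV2 photo) m q.1 q.2)
          (((List.range h_.toNat).flatMap fun a => (List.range l.toNat).map fun b => ((a, b) : Nat × Nat)).foldl
            (fun m q => pvWr4 (fun a b _ _ => pvRead photo a b) m q.1 q.2)
            ((PySem.List.pyRange 0 (h_ * 2) 1).map (fun _ => List.replicate l.toNat 0 ++ List.replicate l.toNat 0)))) := by
    simp only [zoom]
    rw [pv_pyRange_zero h_, pv_pyRange_zero l, pv_pyRange_one' (h_ - 1), pv_pyRange_one' (l - 1),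
      show h_ - 1 - 1 = h_ - 2 from by ring, show l - 1 - 1 = l - 2 from by ring]
    simp only [List.foldl_map]
    rw [pv_foldl_foldl_pairs, pv_foldl_foldl_pairs]
    rw [show ((List.range (h_ - 2).toNat).flatMap fun a => (List.range (l - 2).toNat).map fun b => ((a + 1, b + 1) : Nat × Nat))
        = ((List.range (h_ - 2).toNat).flatMap fun a => (List.range (l - 2).toNat).map fun b => ((a, b) : Nat × Nat)).map
            (fun p => (p.1 + 1, p.2 + 1)) from by
          simp [List.map_flatMap, List.map_map, Function.comp_def]]
    rw [List.foldl_map]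
    rfl
  have hS0 : pvShp ((PySem.List.pyRange 0 (h_ * 2) 1).map (fun _ => List.replicate l.toNat 0 ++ List.replicate l.toNat 0))
      (2 * h_.toNat) (2 * l.toNat) := by
    constructor
    · rw [List.length_map, PySem.List.length_pyRange_one]; omega
    · intro row hrow
      obtain ⟨_, _, rfl⟩ := List.mem_map.mp hrow
      simp only [List.length_append, List.length_replicate]; omega
  have hq1 : ∀ q ∈ ((List.range h_.toNat).flatMap fun a => (List.range l.toNat).map fun b => ((a, b) : Nat × Nat)),
      2 * q.1 + 1 < 2 * h_.toNat ∧ 2 * q.2 + 1 < 2 * l.toNat := by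
    intro q hqm
    simp only [List.mem_flatMap, List.mem_map, List.mem_range] at hqm
    obtain ⟨a, ha, b, hb, rfl⟩ := hqm
    omega
  have hq2 : ∀ q ∈ ((List.range (h_ - 2).toNat).flatMap fun a => (List.range (l - 2).toNat).map fun b => ((a + 1, b + 1) : Nat × Nat)),
      2 * q.1 + 1 < 2 * h_.toNat ∧ 2 * q.2 + 1 < 2 * l.toNat := by
    intro q hqm
    simp only [List.mem_flatMap, List.mem_map, List.mem_range] at hqm
    obtain ⟨a, ha, b, hb, rfl⟩ := hqm
    omega
  have hS1 := pvShp_foldl_wr4 (fun a b _ _ => pvRead photo a b)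
    ((List.range h_.toNat).flatMap fun a => (List.range l.toNat).map fun b => ((a, b) : Nat × Nat)) _
    (2 * h_.toNat) (2 * l.toNat) hS0
  rw [hA]
  apply pv_eq_mat_of _ _ _ _ (pvShp_foldl_wr4 _ _ _ _ _ hS1)
  intro r c hr hcb
  rw [pvOcell_foldl_wr4 _ _ _ _ _ hS1 hq2 r c, pvOcell_foldl_wr4 _ _ _ _ _ hS0 hq1 r c]
  have hmem1 : ((r / 2, c / 2) : Nat × Nat) ∈ ((List.range h_.toNat).flatMap fun a => (List.range l.toNat).map fun b => ((a, b) : Nat × Nat)) := by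
    simp only [List.mem_flatMap, List.mem_map, List.mem_range]
    exact ⟨r / 2, by omega, c / 2, by omega, rfl⟩
  rw [if_pos hmem1]
  simp only [pv_mem_pairs]
  unfold pvCell pvEI pvV2
  split_ifs with hL hR hR <;> first | rfl | (exfalso; omega)

-- the two cells appended to the top (resp. bottom) row for source pixel (j, k) in B
def pvTop (l h_ : Int) (photo : List (List Int)) (j k : Int) : List Int :=
  if 1 ≤ j ∧ j ≤ h_ - 2 ∧ 1 ≤ k ∧ k ≤ l - 2 then
    [PySem.Int.truncdiv (pvRead photo j k + pvRead photo (j-1) k + pvRead photo j (k-1) + pvRead photo (j-1) (k-1)) 4,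
     PySem.Int.truncdiv (pvRead photo j k + pvRead photo (j-1) k + pvRead photo j (k+1) + pvRead photo (j-1) (k+1)) 4]
  else [pvRead photo j k, pvRead photo j k]

def pvBot (l h_ : Int) (photo : List (List Int)) (j k : Int) : List Int :=
  if 1 ≤ j ∧ j ≤ h_ - 2 ∧ 1 ≤ k ∧ k ≤ l - 2 then
    [PySem.Int.truncdiv (pvRead photo j k + pvRead photo (j+1) k + pvRead photo j (k-1) + pvRead photo (j+1) (k-1)) 4,
     PySem.Int.truncdiv (pvRead photo j k + pvRead photo (j+1) k + pvRead photo j (k+1) + pvRead photo (j+1) (k+1)) 4]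
  else [pvRead photo j k, pvRead photo j k]

lemma pvTop_eq (l h_ : Int) (photo : List (List Int)) (j : Int) :
    pvTop l h_ photo j = fun k => [pvEI l h_ photo j k 0 0, pvEI l h_ photo j k 0 1] := by
  funext k
  by_cases hcnd : 1 ≤ j ∧ j ≤ h_ - 2 ∧ 1 ≤ k ∧ k ≤ l - 2 <;> simp [pvTop, pvEI, hcnd]

lemma pvBot_eq (l h_ : Int) (photo : List (List Int)) (j : Int) :
    pvBot l h_ photo j = fun k => [pvEI l h_ photo j k 1 0, pvEI l h_ photo j k 1 1] := by
  funext k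
  by_cases hcnd : 1 ≤ j ∧ j ≤ h_ - 2 ∧ 1 ≤ k ∧ k ≤ l - 2 <;> simp [pvBot, pvEI, hcnd]

lemma zoomB_flat (l h_ : Int) (photo : List (List Int)) :
    (zoom_alt l h_ photo).1
      = (PySem.List.pyRange 0 h_ 1).flatMap (fun j =>
          [(PySem.List.pyRange 0 l 1).flatMap (pvTop l h_ photo j),
           (PySem.List.pyRange 0 l 1).flatMap (pvBot l h_ photo j)]) := by
  have hin : ∀ j : Int,
      (PySem.List.pyRange 0 l 1).foldl (fun (tb : List Int × List Int) k =>
        if 1 ≤ j ∧ j ≤ h_ - 2 ∧ 1 ≤ k ∧ k ≤ l - 2 then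
          (tb.1 ++ [PySem.Int.truncdiv (pvRead photo j k + pvRead photo (j-1) k + pvRead photo j (k-1) + pvRead photo (j-1) (k-1)) 4,
                    PySem.Int.truncdiv (pvRead photo j k + pvRead photo (j-1) k + pvRead photo j (k+1) + pvRead photo (j-1) (k+1)) 4],
           tb.2 ++ [PySem.Int.truncdiv (pvRead photo j k + pvRead photo (j+1) k + pvRead photo j (k-1) + pvRead photo (j+1) (k-1)) 4,
                    PySem.Int.truncdiv (pvRead photo j k + pvRead photo (j+1) k + pvRead photo j (k+1) + pvRead photo (j+1) (k+1)) 4])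
        else
          (tb.1 ++ [pvRead photo j k, pvRead photo j k],
           tb.2 ++ [pvRead photo j k, pvRead photo j k])) (([], []) : List Int × List Int)
      = ((PySem.List.pyRange 0 l 1).flatMap (pvTop l h_ photo j),
         (PySem.List.pyRange 0 l 1).flatMap (pvBot l h_ photo j)) := by
    intro j
    have hb : (fun (tb : List Int × List Int) (k : Int) =>
        if 1 ≤ j ∧ j ≤ h_ - 2 ∧ 1 ≤ k ∧ k ≤ l - 2 then
          (tb.1 ++ [PySem.Int.truncdiv (pvRead photo j k + pvRead photo (j-1) k + pvRead photo j (k-1) + pvRead photo (j-1) (k-1)) 4,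
                    PySem.Int.truncdiv (pvRead photo j k + pvRead photo (j-1) k + pvRead photo j (k+1) + pvRead photo (j-1) (k+1)) 4],
           tb.2 ++ [PySem.Int.truncdiv (pvRead photo j k + pvRead photo (j+1) k + pvRead photo j (k-1) + pvRead photo (j+1) (k-1)) 4,
                    PySem.Int.truncdiv (pvRead photo j k + pvRead photo (j+1) k + pvRead photo j (k+1) + pvRead photo (j+1) (k+1)) 4])
        else
          (tb.1 ++ [pvRead photo j k, pvRead photo j k],
           tb.2 ++ [pvRead photo j k, pvRead photo j k]))
        = (fun (tb : List Int × List Int) (k : Int) =>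
            (tb.1 ++ pvTop l h_ photo j k, tb.2 ++ pvBot l h_ photo j k)) := by
      funext tb k
      by_cases hcnd : 1 ≤ j ∧ j ≤ h_ - 2 ∧ 1 ≤ k ∧ k ≤ l - 2 <;> simp [pvTop, pvBot, hcnd]
    rw [hb,
      PySem.List.foldl_prod_mk (f := fun t k => t ++ pvTop l h_ photo j k)
        (g := fun t k => t ++ pvBot l h_ photo j k),
      PySem.List.foldl_append_eq_flatMap, PySem.List.foldl_append_eq_flatMap]
    simp
  simp only [zoom_alt]
  trans ((PySem.List.pyRange 0 h_ 1).foldl (fun p2 j =>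
      p2 ++ [(PySem.List.pyRange 0 l 1).flatMap (pvTop l h_ photo j),
             (PySem.List.pyRange 0 l 1).flatMap (pvBot l h_ photo j)]) [])
  · refine PySem.List.foldl_congr_mem _ _ _ _ ?_
    intro acc j hj
    rw [hin j]
    simp
  · rw [PySem.List.foldl_append_eq_flatMap]
    simp

lemma zoomB_mat (l h_ : Int) (photo : List (List Int)) :
    (zoom_alt l h_ photo).1 = pvMat l h_ photo := by
  rw [zoomB_flat, pv_pyRange_zero h_]
  apply List.ext_getElem?
  intro r
  rw [pv_getElem?_flatMap_two, List.getElem?_map]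
  unfold pvMat
  by_cases hr : r < 2 * h_.toNat
  · rw [List.getElem?_range (show r / 2 < h_.toNat by omega), List.getElem?_map,
      List.getElem?_range hr]
    simp only [Option.map_some]
    congr 1
    rw [pv_pyRange_zero l]
    rcases Nat.mod_two_eq_zero_or_one r with hpar | hpar
    · simp only [hpar, if_true, pvTop_eq]
      apply List.ext_getElem?
      intro c
      rw [pv_getElem?_flatMap_two, List.getElem?_map, List.getElem?_map]
      by_cases hcb : c < 2 * l.toNat
      · rw [List.getElem?_range (show c / 2 < l.toNat by omega), List.getElem?_range hcb]
        simp only [Option.map_some, pvCell, hpar]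
        rcases Nat.mod_two_eq_zero_or_one c with hcp | hcp
        · simp only [hcp, if_true]
        · simp only [hcp]
          rw [if_neg Nat.one_ne_zero]
      · rw [List.getElem?_eq_none (by rw [List.length_range]; omega),
          List.getElem?_eq_none (by rw [List.length_range]; omega)]
        rfl
    · simp only [hpar, pvBot_eq]
      rw [if_neg Nat.one_ne_zero]
      apply List.ext_getElem?
      intro c
      rw [pv_getElem?_flatMap_two, List.getElem?_map, List.getElem?_map]
      by_cases hcb : c < 2 * l.toNat
      · rw [List.getElem?_range (show c / 2 < l.toNat by omega), List.getElem?_range hcb]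
        simp only [Option.map_some, pvCell, hpar]
        rcases Nat.mod_two_eq_zero_or_one c with hcp | hcp
        · simp only [hcp, if_true]
        · simp only [hcp]
          rw [if_neg Nat.one_ne_zero]
      · rw [List.getElem?_eq_none (by rw [List.length_range]; omega),
          List.getElem?_eq_none (by rw [List.length_range]; omega)]
        rfl
  · rw [List.getElem?_eq_none (by rw [List.length_range]; omega),
      List.getElem?_eq_none (by rw [List.length_map, List.length_range]; omega)]
    rfl

-- ===== VERDICT (by name: the statement is the Claim_ definition above) =====
theorem zoom_spec : Claim_equal_zoom := by
  intro l h_ photo _ _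
  show zoom l h_ photo = zoom_alt l h_ photo
  have h1 := zoomA_mat l h_ photo
  have h2 := zoomB_mat l h_ photo
  exact Prod.ext (h1.trans h2.symm) rfl
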